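-- pv_equiv track=rewrite | github.com/hrkim28/TCT | 20190306/TCT_20190306_KimJinKwui.py | transfer_identifier
-- ===== SOURCE A (Python) =====
-- def transfer_identifier(input_lang_type, input_param):
--     output_param = ""
--
--     if input_lang_type == 'java':
--         output_list = []
--         pre_inx = 0
--         for inx, ch in enumerate(input_param):
--             if ch.isupper():
--                 output_list.append(input_param[pre_inx:inx].lower())
--                 pre_inx = inx
--
--         if pre_inx != len(input_param):
--             output_list.append(input_param[pre_inx:].lower())
--
--         output_param = '_'.join(output_list)
--
--     elif input_lang_type == 'c++':
--         output_param = input_param.replace('_', ' ').title().replace(' ', '')[0].lower() + input_param.replace('_', ' ').title().replace(' ', '')[1:]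
--
--     return output_param
-- ===== SOURCE B (Python) =====
-- def transfer_identifier(input_lang_type, input_param):
--     if input_lang_type == 'java':
--         out = []
--         for ch in input_param:
--             out.append('_' + ch.lower() if ch.isupper() else ch)
--         return ''.join(out)
--     if input_lang_type == 'c++':
--         buf = []
--         prev_alpha = False
--         for ch in input_param:
--             if ch == '_' or ch == ' ':
--                 prev_alpha = False
--             elif ch.isalpha():
--                 buf.append(ch.lower() if prev_alpha else ch.upper())
--                 prev_alpha = True
--             else:
--                 buf.append(ch)
--                 prev_alpha = False
--         buf[0] = buf[0].lower()
--         return ''.join(buf)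
--     return ''
-- ===== Notes on version B (the rewrite author's own statement) =====
-- stated objective: simpler
-- what changed: java branch: one streaming per-char pass emitting '_'+lower(ch) at each uppercase, replacing the index/slice segmentation with pre_inx, the segment list and the join; c++ branch: one pass with a prev-alpha flag that skips '_'/' ' separators and cases each letter directly, replacing the replace/title/replace string-pipeline.
import Mathlib
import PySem

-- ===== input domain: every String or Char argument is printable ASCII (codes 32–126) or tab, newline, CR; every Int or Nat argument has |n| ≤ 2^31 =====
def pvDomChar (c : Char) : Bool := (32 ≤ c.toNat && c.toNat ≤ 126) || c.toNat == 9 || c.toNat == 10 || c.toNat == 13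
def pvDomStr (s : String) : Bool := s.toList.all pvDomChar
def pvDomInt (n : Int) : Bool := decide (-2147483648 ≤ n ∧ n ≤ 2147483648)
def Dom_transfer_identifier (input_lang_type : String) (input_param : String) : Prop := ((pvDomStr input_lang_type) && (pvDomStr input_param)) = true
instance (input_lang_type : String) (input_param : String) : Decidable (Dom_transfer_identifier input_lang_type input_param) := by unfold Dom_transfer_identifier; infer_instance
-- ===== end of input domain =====

-- B rewrites both branches as single streaming passes (per-char emission in the java branch; a prev-alpha
-- flag replacing the replace/title/replace pipeline in the c++ branch); objective: simpler.

-- ===== PORT A =====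
-- hand port of Python str.title(): uppercase a letter after a non-cased char, lowercase after a cased one.
-- Exact on the ASCII domain, where the cased characters are exactly the letters.
def pvTitleGo : Bool → List Char → List Char
  | _, [] => []
  | prev, c :: t =>
    if PySem.Chars.isalpha c then
      (if prev then PySem.Chars.lowerChar c else PySem.Chars.upperChar c) :: pvTitleGo true t
    else c :: pvTitleGo false t

def transfer_identifier (input_lang_type : String) (input_param : String) : String :=
  if input_lang_type == "java" then
    let s := input_param.toList
    let st := (PySem.List.enumerate s 0).foldl
      (fun (st : List (List Char) × Int) ic =>
        if PySem.Chars.isupper ic.2 then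
          (st.1 ++ [PySem.Chars.lower (PySem.List.slice s (some st.2) (some ic.1))], ic.1)
        else st) ([], 0)
    let lst := if st.2 ≠ (s.length : Int) then
        st.1 ++ [PySem.Chars.lower (PySem.List.slice s (some st.2) none)]
      else st.1
    String.ofList (PySem.Chars.join ['_'] lst)
  else if input_lang_type == "c++" then
    let u := PySem.Chars.replace
        (pvTitleGo false (PySem.Chars.replace input_param.toList ['_'] [' '])) [' '] []
    match PySem.List.pyGet? u 0 with
    | none => ""   -- Python raises IndexError on u[0] here; excluded by Pre_
    | some c => String.ofList (PySem.Chars.lowerChar c :: PySem.List.slice u (some 1) none)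
  else ""

-- ===== PORT B =====
def transfer_identifier_alt (input_lang_type : String) (input_param : String) : String :=
  if input_lang_type == "java" then
    String.ofList (input_param.toList.foldl
      (fun out c => out ++ (if PySem.Chars.isupper c then ['_', PySem.Chars.lowerChar c] else [c])) [])
  else if input_lang_type == "c++" then
    let st := input_param.toList.foldl
      (fun (st : List Char × Bool) c =>
        if c == '_' || c == ' ' then (st.1, false)
        else if PySem.Chars.isalpha c then
          (st.1 ++ [if st.2 then PySem.Chars.lowerChar c else PySem.Chars.upperChar c], true)
        else (st.1 ++ [c], false)) ([], false)
    match st.1 with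
    | [] => ""   -- Python raises IndexError on buf[0] here; excluded by Pre_
    | h :: t => String.ofList (PySem.Chars.lowerChar h :: t)
  else ""

-- ===== PRECONDITION & SPEC =====
-- Pre_ excludes exactly the inputs on which Python A raises IndexError: language 'c++' with every
-- character of input_param an underscore or a space (the title-cased, separator-stripped string is empty).
def Pre_transfer_identifier (input_lang_type : String) (input_param : String) : Prop :=
  input_lang_type = "c++" → (input_param.toList.any (fun c => !(c == '_' || c == ' '))) = true
instance (input_lang_type : String) (input_param : String) : Decidable (Pre_transfer_identifier input_lang_type input_param) := by unfold Pre_transfer_identifier; infer_instance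

def pvWitness_transfer_identifier : String × String := ("java", "getUserName")

def Spec_transfer_identifier (input_lang_type : String) (input_param : String) (out : String) : Prop := out = transfer_identifier_alt input_lang_type input_param
instance (input_lang_type : String) (input_param : String) (out : String) : Decidable (Spec_transfer_identifier input_lang_type input_param out) := by unfold Spec_transfer_identifier; infer_instance

-- ===== CLAIM (what is proved, stated in full; the proofs are below) =====
def Claim_equal_transfer_identifier : Prop := ∀ (input_lang_type : String) (input_param : String), Dom_transfer_identifier input_lang_type input_param → Pre_transfer_identifier input_lang_type input_param → Spec_transfer_identifier input_lang_type input_param (transfer_identifier input_lang_type input_param)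

-- ===== LEMMAS AND PROOFS =====

-- B's java emission rule for one character
def pvF (c : Char) : List Char :=
  if PySem.Chars.isupper c then ['_', PySem.Chars.lowerChar c] else [c]

-- A's java loop with the pending segment carried explicitly instead of via indices into the string
def pvAAbs : List Char → List Char → List (List Char) → List (List Char) × List Char
  | [], pend, acc => (acc, pend)
  | c :: t, pend, acc =>
    if PySem.Chars.isupper c then pvAAbs t [c] (acc ++ [PySem.Chars.lower pend])
    else pvAAbs t (pend ++ [c]) acc

def pvOpt (pend : List Char) : List (List Char) :=
  if pend = [] then [] else [PySem.Chars.lower pend]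

lemma pvJoinSnoc (sep y : List Char) (xs : List (List Char)) :
    PySem.Chars.join sep (xs ++ [y]) =
      if xs = [] then y else PySem.Chars.join sep xs ++ sep ++ y := by
  induction xs with
  | nil => simp [PySem.Chars.join_singleton]
  | cons x xs ih =>
    cases xs with
    | nil => simp [PySem.Chars.join_cons_cons, PySem.Chars.join_singleton]
    | cons b l =>
      simp only [List.cons_append] at ih ⊢
      rw [PySem.Chars.join_cons_cons, ih]
      simp [PySem.Chars.join_cons_cons, List.append_assoc]
-- A's index/slice loop over enumerate = the pending-segment loop pvAAbs
lemma pvBridge (s : List Char) :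
    ∀ (t : List Char) (i p : Nat) (acc : List (List Char)),
    s.drop i = t → p ≤ i →
    ∃ p' : Nat,
      (PySem.List.enumerate t (i : Int)).foldl
        (fun (st : List (List Char) × Int) ic =>
          if PySem.Chars.isupper ic.2 then
            (st.1 ++ [PySem.Chars.lower (PySem.List.slice s (some st.2) (some ic.1))], ic.1)
          else st) (acc, (p : Int))
        = ((pvAAbs t ((s.drop p).take (i - p)) acc).1, (p' : Int))
      ∧ (s.drop p').take (i + t.length - p') = (pvAAbs t ((s.drop p).take (i - p)) acc).2
      ∧ p' ≤ i + t.length := by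
  intro t
  induction t with
  | nil =>
    intro i p acc hdrop hpi
    refine ⟨p, ?_, ?_, ?_⟩
    · simp [PySem.List.enumerate, pvAAbs]
    · simp [pvAAbs]
    · omega
  | cons c t ih =>
    intro i p acc hdrop hpi
    have hi : i < s.length := by
      by_contra hle
      rw [List.drop_eq_nil_of_le (by omega)] at hdrop
      simp at hdrop
    have hdrop1 : s.drop (i + 1) = t := by
      rw [← List.drop_drop, hdrop]; rfl
    have hci : s[i]? = some c := by
      have h0 : (s.drop i)[0]? = s[i]? := by simp [List.getElem?_drop]
      rw [hdrop] at h0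
      simpa using h0.symm
    rw [PySem.List.enumerate_cons, List.foldl_cons]
    by_cases hu : PySem.Chars.isupper c = true
    · have hslice : PySem.List.slice s (some (p : Int)) (some (i : Int))
          = (s.drop p).take (i - p) := by
        rw [PySem.List.slice_toNat s (by positivity) (by positivity)]
        simp
      simp only [hu, if_true]
      have hstep : ((acc, (p : Int)).1 ++ [PySem.Chars.lower (PySem.List.slice s (some (acc, (p:Int)).2) (some ((i:Int), c).1))], ((i:Int), c).1)
          = (acc ++ [PySem.Chars.lower ((s.drop p).take (i - p))], ((i:Nat) : Int)) := by
        simp [hslice]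
      rw [hstep]
      obtain ⟨p', h1, h2, h3⟩ := ih (i+1) i (acc ++ [PySem.Chars.lower ((s.drop p).take (i - p))]) hdrop1 (by omega)
      push_cast at h1
      have htake1 : (s.drop i).take (i + 1 - i) = [c] := by
        rw [hdrop]; simp
      have habs : pvAAbs (c :: t) ((s.drop p).take (i - p)) acc
          = pvAAbs t [c] (acc ++ [PySem.Chars.lower ((s.drop p).take (i - p))]) := by
        simp [pvAAbs, hu]
      rw [htake1] at h1 h2
      refine ⟨p', ?_, ?_, ?_⟩
      · rw [habs]; exact h1
      · rw [habs, show i + (c :: t).length = i + 1 + t.length by simp; omega]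
        exact h2
      · simp only [List.length_cons]; omega
    · simp only [hu]
      simp only [Bool.false_eq_true, if_false]
      obtain ⟨p', h1, h2, h3⟩ := ih (i+1) p acc hdrop1 (by omega)
      push_cast at h1
      have htake : (s.drop p).take (i + 1 - p) = (s.drop p).take (i - p) ++ [c] := by
        have hgd : (s.drop p)[i - p]? = some c := by
          rw [List.getElem?_drop, show p + (i - p) = i by omega]
          exact hci
        rw [show i + 1 - p = (i - p) + 1 by omega, List.take_add_one, hgd]
        simp
      have habs : pvAAbs (c :: t) ((s.drop p).take (i - p)) acc
          = pvAAbs t ((s.drop p).take (i - p) ++ [c]) acc := by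
        simp [pvAAbs, hu]
      rw [htake] at h1 h2
      refine ⟨p', ?_, ?_, ?_⟩
      · rw [habs]; exact h1
      · rw [habs, show i + (c :: t).length = i + 1 + t.length by simp; omega]
        exact h2
      · simp only [List.length_cons]; omega

-- joined segment list of A = flat per-character emission of B
lemma pvMain :
    ∀ (t pend : List Char) (acc : List (List Char)), (pend = [] → acc = []) →
    PySem.Chars.join ['_'] ((pvAAbs t pend acc).1 ++ pvOpt (pvAAbs t pend acc).2)
      = PySem.Chars.join ['_'] (acc ++ pvOpt pend) ++ t.flatMap pvF := by
  intro t
  induction t with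
  | nil => intro pend acc _; simp [pvAAbs]
  | cons c t ih =>
    intro pend acc hinv
    by_cases hu : PySem.Chars.isupper c = true
    · rw [show pvAAbs (c :: t) pend acc = pvAAbs t [c] (acc ++ [PySem.Chars.lower pend]) by
        simp [pvAAbs, hu]]
      rw [ih [c] (acc ++ [PySem.Chars.lower pend]) (by simp)]
      have hopt : pvOpt [c] = [[PySem.Chars.lowerChar c]] := by
        simp [pvOpt, PySem.Chars.lower]
      rw [hopt]
      have hF : pvF c = ['_', PySem.Chars.lowerChar c] := by simp [pvF, hu]
      rw [List.flatMap_cons, hF]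
      by_cases hp : pend = []
      · have hacc := hinv hp
        subst hp; subst hacc
        simp [pvOpt, PySem.Chars.lower, PySem.Chars.join_cons_cons, PySem.Chars.join_singleton,
          PySem.Chars.join_nil]
      · have h1 : pvOpt pend = [PySem.Chars.lower pend] := by simp [pvOpt, hp]
        rw [h1]
        rw [show acc ++ [PySem.Chars.lower pend] ++ [[PySem.Chars.lowerChar c]]
              = (acc ++ [PySem.Chars.lower pend]) ++ [[PySem.Chars.lowerChar c]] by simp]
        rw [pvJoinSnoc, if_neg (by simp)]
        simp [List.append_assoc]
    · rw [show pvAAbs (c :: t) pend acc = pvAAbs t (pend ++ [c]) acc by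
        simp [pvAAbs, hu]]
      rw [ih (pend ++ [c]) acc (by simp)]
      have hlc : PySem.Chars.lowerChar c = c := by simp [PySem.Chars.lowerChar, hu]
      have h2 : pvOpt (pend ++ [c]) = [PySem.Chars.lower pend ++ [c]] := by
        simp [pvOpt, PySem.Chars.lower, hlc]
      rw [h2]
      have hF : pvF c = [c] := by simp [pvF, hu]
      rw [List.flatMap_cons, hF]
      by_cases hp : pend = []
      · have hacc := hinv hp
        subst hp; subst hacc
        simp [pvOpt, PySem.Chars.lower, PySem.Chars.join_singleton, PySem.Chars.join_nil]
      · have h1 : pvOpt pend = [PySem.Chars.lower pend] := by simp [pvOpt, hp]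
        rw [h1, pvJoinSnoc, pvJoinSnoc]
        by_cases ha : acc = []
        · subst ha; simp
        · rw [if_neg ha, if_neg ha]; simp [List.append_assoc]

lemma pvReplaceGo (o : Char) (new : List Char) :
    ∀ (l : List Char) (fuel : Nat) (acc : List Char), l.length ≤ fuel →
    PySem.Chars.replace.go [o] new fuel l acc
      = acc.reverse ++ l.flatMap (fun c => if c = o then new else [c]) := by
  intro l
  induction l with
  | nil =>
    intro fuel acc _
    cases fuel <;> simp [PySem.Chars.replace.go]
  | cons c t ih =>
    intro fuel acc hf
    cases fuel with
    | zero => simp at hf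
    | succ k =>
      have hlen : t.length ≤ k := by simpa using hf
      by_cases hco : o = c
      · subst hco
        simp [PySem.Chars.replace.go, List.isPrefixOf, ih _ _ hlen]
      · have hpre : ([o].isPrefixOf (c :: t)) = false := by
          simp [List.isPrefixOf]
          exact hco
        simp only [PySem.Chars.replace.go, hpre, Bool.false_eq_true, if_false, ih _ _ hlen]
        rw [List.flatMap_cons, if_neg (fun h => hco h.symm)]
        simp

lemma pvReplaceSingle (o : Char) (new : List Char) (l : List Char) :
    PySem.Chars.replace l [o] new = l.flatMap (fun c => if c = o then new else [c]) := by
  simp [PySem.Chars.replace, pvReplaceGo o new l l.length [] le_rfl]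

def pvRepl (c : Char) : Char := if c = '_' then ' ' else c

lemma pvCasedNeSpace (c : Char) (h : PySem.Chars.isalpha c = true) :
    PySem.Chars.lowerChar c ≠ ' ' ∧ PySem.Chars.upperChar c ≠ ' ' := by
  simp [PySem.Chars.isalpha, PySem.Chars.isupper, PySem.Chars.islower] at h
  constructor
  · intro hc
    unfold PySem.Chars.lowerChar at hc
    by_cases hu : PySem.Chars.isupper c = true
    · rw [if_pos hu] at hc
      have hb : 65 ≤ c.toNat ∧ c.toNat ≤ 90 := by
        simp [PySem.Chars.isupper] at hu
        exact ⟨hu.1, hu.2⟩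
      have hv : (c.toNat + 32).isValidChar := by left; omega
      have heq : (Char.ofNat (c.toNat + 32)).toNat = c.toNat + 32 := by
        rw [Char.ofNat, dif_pos hv]; exact Char.toNat_ofNatAux hv
      rw [hc] at heq
      have : (' ' : Char).toNat = 32 := by decide
      omega
    · rw [if_neg hu] at hc
      subst hc
      rcases h with ⟨h1, _⟩ | ⟨h1, _⟩ <;> exact absurd h1 (by decide)
  · intro hc
    unfold PySem.Chars.upperChar at hc
    by_cases hl : PySem.Chars.islower c = true
    · rw [if_pos hl] at hc
      have hb : 97 ≤ c.toNat ∧ c.toNat ≤ 122 := by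
        simp [PySem.Chars.islower] at hl
        exact ⟨hl.1, hl.2⟩
      have hv : (c.toNat - 32).isValidChar := by left; omega
      have heq : (Char.ofNat (c.toNat - 32)).toNat = c.toNat - 32 := by
        rw [Char.ofNat, dif_pos hv]; exact Char.toNat_ofNatAux hv
      rw [hc] at heq
      have : (' ' : Char).toNat = 32 := by decide
      omega
    · rw [if_neg hl] at hc
      subst hc
      rcases h with ⟨h1, _⟩ | ⟨h1, _⟩ <;> exact absurd h1 (by decide)

-- B's c++ streaming loop = title() of the underscore-to-space replacement, with the spaces stripped
lemma pvCpp :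
    ∀ (t : List Char) (prev : Bool) (buf : List Char),
    (t.foldl
      (fun (st : List Char × Bool) c =>
        if c == '_' || c == ' ' then (st.1, false)
        else if PySem.Chars.isalpha c then
          (st.1 ++ [if st.2 then PySem.Chars.lowerChar c else PySem.Chars.upperChar c], true)
        else (st.1 ++ [c], false)) (buf, prev)).1
      = buf ++ (pvTitleGo prev (t.map pvRepl)).filter (fun c => !(c == ' ')) := by
  intro t
  induction t with
  | nil => intro prev buf; simp [pvTitleGo]
  | cons c t ih =>
    intro prev buf
    rw [List.foldl_cons, List.map_cons]
    by_cases hsep : c = '_' ∨ c = ' '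
    · have hb : (c == '_' || c == ' ') = true := by
        rcases hsep with h | h <;> simp [h]
      have hr : pvRepl c = ' ' := by
        rcases hsep with h | h <;> simp [pvRepl, h]
      have hna : PySem.Chars.isalpha ' ' = false := by decide
      rw [hb]
      simp only [if_true]
      rw [ih false buf, hr]
      simp [pvTitleGo, hna]
    · rw [not_or] at hsep
      have hb : (c == '_' || c == ' ') = false := by
        simp [hsep.1, hsep.2]
      have hr : pvRepl c = c := by simp [pvRepl, hsep.1]
      rw [hb]
      simp only [Bool.false_eq_true, if_false]
      by_cases hal : PySem.Chars.isalpha c = true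
      · rw [if_pos hal, ih true, hr]
        have hne : ((if prev then PySem.Chars.lowerChar c else PySem.Chars.upperChar c) == ' ') = false := by
          rcases pvCasedNeSpace c hal with ⟨h1, h2⟩
          cases prev <;> simp [h1, h2]
        simp [pvTitleGo, hal, hne]
      · rw [if_neg hal, ih false, hr]
        have hcne : (c == ' ') = false := by simp [hsep.2]
        simp [pvTitleGo, hal, hcne]

lemma pvFlatMapFilter (l : List Char) :
    l.flatMap (fun c => if c = ' ' then [] else [c]) = l.filter (fun c => !(c == ' ')) := by
  induction l with
  | nil => rfl
  | cons c t ih => by_cases h : c = ' ' <;> simp [h, ih]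

-- ===== VERDICT (by name: the statement is the Claim_ definition above) =====
theorem transfer_identifier_spec : Claim_equal_transfer_identifier := by
  intro lt ip _ _
  unfold Spec_transfer_identifier transfer_identifier transfer_identifier_alt
  by_cases hj : (lt == "java") = true
  · rw [hj]
    simp only [if_true]
    obtain ⟨p', h1, h2, h3⟩ := pvBridge ip.toList ip.toList 0 0 [] (by simp) le_rfl
    simp only [Nat.cast_zero, Nat.sub_zero, List.drop_zero, List.take_zero, Nat.zero_add] at h1 h2
    rw [h1]
    dsimp only
    have hpend : ip.toList.drop p' = (pvAAbs ip.toList [] []).2 := by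
      rw [← h2, List.take_of_length_le (by simp)]
    have hflat : (ip.toList.foldl
        (fun out c => out ++ (if PySem.Chars.isupper c then ['_', PySem.Chars.lowerChar c] else [c])) [])
        = ip.toList.flatMap pvF := by
      rw [show (fun (out : List Char) (c : Char) =>
            out ++ (if PySem.Chars.isupper c then ['_', PySem.Chars.lowerChar c] else [c]))
          = (fun out c => out ++ pvF c) by funext out c; rw [pvF]]
      rw [PySem.List.foldl_append_eq_flatMap pvF ip.toList []]
      rfl
    rw [hflat]
    have hopt : (if (p' : Int) ≠ (ip.toList.length : Int) then
          (pvAAbs ip.toList [] []).1 ++ [PySem.Chars.lower (PySem.List.slice ip.toList (some (p' : Int)) none)]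
        else (pvAAbs ip.toList [] []).1)
        = (pvAAbs ip.toList [] []).1 ++ pvOpt (pvAAbs ip.toList [] []).2 := by
      by_cases hne : ((p' : Int) ≠ (ip.toList.length : Int))
      · rw [if_pos hne]
        have hpne : (pvAAbs ip.toList [] []).2 ≠ [] := by
          rw [← hpend]
          intro hnil
          rw [List.drop_eq_nil_iff] at hnil
          have hpl : p' = ip.toList.length := by omega
          exact hne (by exact_mod_cast hpl)
        rw [show pvOpt (pvAAbs ip.toList [] []).2
              = [PySem.Chars.lower (pvAAbs ip.toList [] []).2] by simp [pvOpt, hpne]]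
        rw [PySem.List.slice_from _ (by positivity), Int.toNat_natCast, hpend]
      · rw [if_neg hne]
        rw [not_ne_iff] at hne
        have hp'len : p' = ip.toList.length := by exact_mod_cast hne
        have hpnil : (pvAAbs ip.toList [] []).2 = [] := by
          rw [← hpend, hp'len, List.drop_length]
        rw [show pvOpt (pvAAbs ip.toList [] []).2 = [] by simp [pvOpt, hpnil], List.append_nil]
    rw [hopt]
    have hmain := pvMain ip.toList [] [] (fun _ => rfl)
    rw [show pvOpt ([] : List Char) = [] by simp [pvOpt]] at hmain
    simp only [List.nil_append, PySem.Chars.join_nil] at hmain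
    rw [hmain]
  · rw [Bool.not_eq_true] at hj
    rw [hj]
    simp only [Bool.false_eq_true, if_false]
    by_cases hc : (lt == "c++") = true
    · rw [hc]
      simp only [if_true]
      have hr1 : PySem.Chars.replace ip.toList ['_'] [' '] = ip.toList.map pvRepl := by
        rw [pvReplaceSingle]
        rw [show (fun c => if c = '_' then [' '] else [c]) = (fun c => [pvRepl c]) by
          funext c; by_cases h : c = '_' <;> simp [pvRepl, h]]
        exact (List.map_eq_flatMap).symm
      have hr2 : PySem.Chars.replace (pvTitleGo false (ip.toList.map pvRepl)) [' '] []
          = (pvTitleGo false (ip.toList.map pvRepl)).filter (fun c => !(c == ' ')) := by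
        rw [pvReplaceSingle, pvFlatMapFilter]
      have hbuf := pvCpp ip.toList false []
      simp only [List.nil_append] at hbuf
      rw [hr1, hr2, hbuf]
      cases hU : (pvTitleGo false (ip.toList.map pvRepl)).filter (fun c => !(c == ' ')) with
      | nil => rfl
      | cons h t =>
        rw [show PySem.List.pyGet? (h :: t) 0 = some h by
          simp [PySem.List.pyGet?, PySem.List.pyIdx?]]
        rw [show PySem.List.slice (h :: t) (some 1) none = t by
          rw [PySem.List.slice_from _ (by norm_num)]; rfl]
    · rw [Bool.not_eq_true] at hc
      rw [hc]
      rfl
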